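-- pv_equiv track=rewrite | github.com/Pandey-22/Function | Docs Qno6.py | even_num
-- ===== SOURCE A (Python) =====
-- def even_num(l):
--     enum=[]
--     n=0
--     while n<len(l):
--         n=n+1
--         if n%2==0:
--             enum.append(n)
--     return enum
-- ===== SOURCE B (Python) =====
-- def even_num(l):
--     k = len(l) // 2
--     return [2 * i for i in range(1, k + 1)]
-- ===== Notes on version B (the rewrite author's own statement) =====
-- stated objective: simpler
-- what changed: Instead of scanning every n in 1..len(l) with a parity test and conditional append, B computes the count of evens k = len(l)//2 and builds the result by arithmetic enumeration 2*i for i in 1..k, eliminating the parity branch and halving the loop length.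
import Mathlib
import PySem

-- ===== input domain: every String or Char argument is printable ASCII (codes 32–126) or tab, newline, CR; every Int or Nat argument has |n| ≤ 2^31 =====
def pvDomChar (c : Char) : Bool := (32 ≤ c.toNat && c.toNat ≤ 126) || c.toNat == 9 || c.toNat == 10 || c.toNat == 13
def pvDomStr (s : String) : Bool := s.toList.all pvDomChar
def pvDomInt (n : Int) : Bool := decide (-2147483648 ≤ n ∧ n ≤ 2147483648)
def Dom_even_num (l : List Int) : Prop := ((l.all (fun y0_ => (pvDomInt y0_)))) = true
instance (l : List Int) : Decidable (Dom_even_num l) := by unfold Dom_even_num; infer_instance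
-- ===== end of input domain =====

-- B replaces A's scan of every n in 1..len(l) with a parity test by direct arithmetic enumeration of the k = len(l)//2 even values (simpler).

-- ===== PORT A =====
-- while n < len(l): n += 1; if n % 2 == 0: enum.append(n)
-- recursion on the remaining iteration count `r = len(l) - n`; `n` stays the loop counter
def evenLoopA : Nat → Nat → List Int → List Int
  | 0, _, enum => enum
  | r + 1, n, enum =>
      let n' := n + 1
      if n' % 2 == 0 then evenLoopA r n' (enum ++ [(n' : Int)]) else evenLoopA r n' enum

def even_num (l : List Int) : List Int := evenLoopA l.length 0 []

-- ===== PORT B =====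
-- k = len(l) // 2; [2*i for i in range(1, k+1)]
def even_num_alt (l : List Int) : List Int :=
  (PySem.List.pyRange 1 (PySem.Int.floordiv (l.length : Int) 2 + 1) 1).map (fun i => 2 * i)

-- ===== PRECONDITION & SPEC =====
def Spec_even_num (l : List Int) (out : List Int) : Prop := out = even_num_alt l
instance (l : List Int) (out : List Int) : Decidable (Spec_even_num l out) := by unfold Spec_even_num; infer_instance

-- ===== CLAIM (what is proved, stated in full; the proofs are below) =====
def Claim_equal_even_num : Prop := ∀ (l : List Int), Dom_even_num l → Spec_even_num l (even_num l)

-- ===== LEMMAS AND PROOFS =====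

lemma pyRange_two_nil (a b : Int) (h : b ≤ a) : PySem.List.pyRange a b 2 = [] := by
  rw [PySem.List.pyRange_of_pos _ _ (by norm_num : (0:Int) < 2), if_neg (by omega)]
  simp

lemma pyRange_two_cons (a b : Int) (h : a < b) :
    PySem.List.pyRange a b 2 = a :: PySem.List.pyRange (a + 2) b 2 := by
  rw [PySem.List.pyRange_of_pos _ _ (by norm_num : (0:Int) < 2),
      PySem.List.pyRange_of_pos _ _ (by norm_num : (0:Int) < 2), if_pos h]
  by_cases h4 : a + 2 < b
  · rw [if_pos h4]
    have hc : ((b - a + 2 - 1) / 2).toNat = ((b - (a + 2) + 2 - 1) / 2).toNat + 1 := by omega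
    rw [hc, List.range_succ_eq_map]
    simp only [List.map_cons, List.map_map, Nat.cast_zero, mul_zero, add_zero]
    congr 1
    apply List.map_congr_left
    intro k _
    simp only [Function.comp_apply]
    push_cast
    ring
  · rw [if_neg h4]
    have hc : ((b - a + 2 - 1) / 2).toNat = 1 := by omega
    simp [hc, List.range_succ]

-- A's loop started at an even counter n with r iterations left appends exactly the evens n+2, n+4, …, ≤ n+r
lemma evenLoopA_even (r : Nat) : ∀ (n : Nat), n % 2 = 0 → ∀ (enum : List Int),
    evenLoopA r n enum = enum ++ PySem.List.pyRange ((n : Int) + 2) ((n : Int) + r + 1) 2 := by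
  induction r using Nat.strong_induction_on with
  | _ r ih =>
    intro n hn enum
    match r with
    | 0 =>
      rw [pyRange_two_nil _ _ (by push_cast; omega)]
      simp [evenLoopA]
    | 1 =>
      have h1 : ¬ ((n + 1) % 2 == 0) = true := by simp; omega
      rw [pyRange_two_nil _ _ (by push_cast; omega)]
      simp [evenLoopA, h1]
    | r + 2 =>
      have h1 : ((n + 1) % 2 == 0) = false := by simp; omega
      have h2 : ((n + 1 + 1) % 2 == 0) = true := by simp; omega
      simp only [evenLoopA, h1, h2, Bool.false_eq_true, if_true, if_false]
      rw [ih r (by omega) (n + 2) (by omega),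
          pyRange_two_cons ((n : Int) + 2) (((n : Nat) : Int) + (((r + 2 : Nat)) : Int) + 1)
            (by push_cast; omega)]
      simp only [List.append_assoc, List.singleton_append]
      push_cast
      ring_nf
  termination_by r => r

-- ===== VERDICT (by name: the statement is the Claim_ definition above) =====
theorem even_num_spec : Claim_equal_even_num := by
  unfold Claim_equal_even_num Spec_even_num
  intro l _
  unfold even_num even_num_alt
  rw [evenLoopA_even l.length 0 rfl [],
      PySem.List.pyRange_of_pos _ _ (by norm_num : (0:Int) < 2),
      PySem.List.pyRange_of_pos _ _ (by norm_num : (0:Int) < 1),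
      show PySem.Int.floordiv (l.length : Int) 2 = (l.length : Int) / 2 by
        simp only [PySem.Int.floordiv]; rw [Int.fdiv_eq_ediv]; simp]
  simp only [Nat.cast_zero, zero_add, List.nil_append, List.map_map]
  have hcount : (if (2:Int) < ↑l.length + 1 then ((↑l.length + 1 - 2 + 2 - 1 : Int) / 2).toNat else 0)
      = (if (1:Int) < ↑l.length / 2 + 1 then ((↑l.length / 2 + 1 - 1 + 1 - 1 : Int) / 1).toNat else 0) := by
    split_ifs <;> omega
  rw [hcount]
  apply List.map_congr_left
  intro k _
  simp only [Function.comp_apply]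
  ring
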